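-- pv_equiv track=rewrite | github.com/BreathHolder/software-packaging-utility | src/utils/package_documentation_builder.py | _parse_binary_config
-- ===== SOURCE A (Python) =====
-- def _parse_binary_config(contents: str) -> tuple[str, str, str, str]:
--     """Parse binary_config.txt into guided fields."""
--     config_value = "No"
--     config_details = ""
--     args_value = "No"
--     args_details = ""
--     for line in contents.splitlines():
--         stripped = line.strip()
--         if stripped.lower().startswith("- special configurations:"):
--             value = stripped.split(":", 1)[1].strip()
--             if value and value.lower() != "none":
--                 config_value = "Yes"
--                 config_details = value
--             continue
--         if stripped.lower().startswith("- installer arguments:"):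
--             value = stripped.split(":", 1)[1].strip()
--             if value and value.lower() != "none":
--                 args_value = "Yes"
--                 args_details = value
--             continue
--     return config_value, config_details, args_value, args_details
-- ===== SOURCE B (Python) =====
-- def _parse_field(contents, prefix):
--     matched = [line.strip().split(":", 1)[1].strip()
--                for line in contents.splitlines()
--                if line.strip().lower().startswith(prefix)]
--     values = [v for v in matched if v and v.lower() != "none"]
--     if values:
--         return "Yes", values[-1]
--     return "No", ""
--
--
-- def _parse_binary_config(contents: str) -> tuple[str, str, str, str]:
--     config = _parse_field(contents, "- special configurations:")
--     args = _parse_field(contents, "- installer arguments:")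
--     return config[0], config[1], args[0], args[1]
-- ===== Notes on version B (the rewrite author's own statement) =====
-- stated objective: simpler
-- what changed: The single stateful loop over four accumulators is replaced by a shared helper called once per prefix: each call collects the admissible values by comprehension and returns ('Yes', last value) or ('No', ''), replacing overwrite-as-you-scan state with filter-then-take-last.
import Mathlib
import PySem

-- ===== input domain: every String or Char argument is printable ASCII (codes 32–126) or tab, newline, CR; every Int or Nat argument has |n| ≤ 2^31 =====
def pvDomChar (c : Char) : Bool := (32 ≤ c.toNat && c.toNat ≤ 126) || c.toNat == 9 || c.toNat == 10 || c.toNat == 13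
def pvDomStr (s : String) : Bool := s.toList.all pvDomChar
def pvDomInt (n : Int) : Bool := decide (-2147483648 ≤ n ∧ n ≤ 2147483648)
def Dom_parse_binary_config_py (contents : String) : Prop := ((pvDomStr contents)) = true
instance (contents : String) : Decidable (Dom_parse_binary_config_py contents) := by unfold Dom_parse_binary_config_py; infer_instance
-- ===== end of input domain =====

-- B replaces A's single four-accumulator loop by one helper, called once per prefix, that
-- filters the admissible values and takes the last — a simpler decomposition, same results.


-- ===== PORT A =====
-- shared sub-expression of both Pythons: stripped.split(":", 1)[1].strip()
-- (the .getD defaults never fire when the caller has checked the ':'-containing prefix)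
def pvLineValue (s : String) : String :=
  PySem.Str.strip (PySem.List.pyGetD ((PySem.Str.splitMax? s ":" 1).getD []) 1 "")

-- the body of A's for-loop, one step of the fold over splitlines
def pvStepA (st : String × String × String × String) (line : String) :
    String × String × String × String :=
  let stripped := PySem.Str.strip line
  if PySem.Str.startswith (PySem.Str.lower stripped) "- special configurations:" then
    let value := pvLineValue stripped
    if value ≠ "" ∧ PySem.Str.lower value ≠ "none" then ("Yes", value, st.2.2) else st
  else if PySem.Str.startswith (PySem.Str.lower stripped) "- installer arguments:" then
    let value := pvLineValue stripped
    if value ≠ "" ∧ PySem.Str.lower value ≠ "none" then (st.1, st.2.1, "Yes", value) else st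
  else st

def parse_binary_config_py (contents : String) : String × String × String × String :=
  (PySem.Str.splitlines contents).foldl pvStepA ("No", "", "No", "")

-- ===== PORT B =====
-- B's helper _parse_field: comprehension over the lines, filter, take the last value
def pvParseField (contents : String) (pre : String) : String × String :=
  let matched := (PySem.Str.splitlines contents).filterMap (fun line =>
    if PySem.Str.startswith (PySem.Str.lower (PySem.Str.strip line)) pre then
      some (pvLineValue (PySem.Str.strip line))
    else none)
  let values := matched.filter (fun v => !(v == "") && !(PySem.Str.lower v == "none"))
  match values.getLast? with
  | some v => ("Yes", v)
  | none => ("No", "")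

def parse_binary_config_py_alt (contents : String) : String × String × String × String :=
  let config := pvParseField contents "- special configurations:"
  let args := pvParseField contents "- installer arguments:"
  (config.1, config.2, args.1, args.2)

-- ===== PRECONDITION & SPEC =====
def Spec_parse_binary_config_py (contents : String) (out : String × String × String × String) : Prop := out = parse_binary_config_py_alt contents
instance (contents : String) (out : String × String × String × String) : Decidable (Spec_parse_binary_config_py contents out) := by unfold Spec_parse_binary_config_py; infer_instance

-- ===== CLAIM (what is proved, stated in full; the proofs are below) =====
def Claim_equal_parse_binary_config_py : Prop := ∀ (contents : String), Dom_parse_binary_config_py contents → Spec_parse_binary_config_py contents (parse_binary_config_py contents)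

-- ===== LEMMAS AND PROOFS =====

-- proof-side view of one line's contribution to the field for prefix `pre`
def pvG (pre : String) (line : String) : Option String :=
  let stripped := PySem.Str.strip line
  if PySem.Str.startswith (PySem.Str.lower stripped) pre then
    let value := pvLineValue stripped
    if value ≠ "" ∧ PySem.Str.lower value ≠ "none" then some value else none
  else none

-- "last admissible value, else the incoming state" as a function of the collected list
def pvLast (st : String × String) (vs : List String) : String × String :=
  match vs.getLast? with
  | some v => ("Yes", v)
  | none => st

theorem pvLast_cons (st : String × String) (v : String) (vs : List String) :
    pvLast st (v :: vs) = pvLast ("Yes", v) vs := by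
  rcases e : vs.getLast? with _ | w <;> simp [pvLast, List.getLast?_cons, e]

-- a stripped line cannot start with both prefixes
theorem pvDisj (t : String) :
    PySem.Str.startswith t "- special configurations:" = true →
    PySem.Str.startswith t "- installer arguments:" = false := by
  intro h1
  cases h2 : PySem.Str.startswith t "- installer arguments:"
  · rfl
  · exfalso
    rw [PySem.Str.startswith_eq, PySem.Chars.startswith_iff] at h1 h2
    have hle : ("- installer arguments:".toList).length ≤
        ("- special configurations:".toList).length := by decide
    have := List.prefix_of_prefix_length_le h2 h1 hle
    exact (by decide : ¬ ("- installer arguments:".toList <+: "- special configurations:".toList)) this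

-- B's filter over the matched comprehension collapses to one filterMap through pvG
theorem pvFilter_eq (pre : String) (ls : List String) :
    (ls.filterMap (fun line =>
        if PySem.Str.startswith (PySem.Str.lower (PySem.Str.strip line)) pre then
          some (pvLineValue (PySem.Str.strip line))
        else none)).filter (fun v => !(v == "") && !(PySem.Str.lower v == "none")) =
      ls.filterMap (pvG pre) := by
  induction ls with
  | nil => rfl
  | cons l rest ih =>
    simp only [List.filterMap_cons]
    by_cases hp : PySem.Str.startswith (PySem.Str.lower (PySem.Str.strip l)) pre = true
    · by_cases hv : pvLineValue (PySem.Str.strip l) ≠ "" ∧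
          PySem.Str.lower (pvLineValue (PySem.Str.strip l)) ≠ "none"
      · have hg : pvG pre l = some (pvLineValue (PySem.Str.strip l)) := by
          simp only [pvG]; rw [if_pos hp, if_pos hv]
        have hf : (!(pvLineValue (PySem.Str.strip l) == "") &&
            !(PySem.Str.lower (pvLineValue (PySem.Str.strip l)) == "none")) = true := by
          simp [hv.1, hv.2]
        rw [if_pos hp, hg]
        simp only [List.filter_cons]
        rw [if_pos hf, ih]
      · have hg : pvG pre l = none := by
          simp only [pvG]; rw [if_pos hp, if_neg hv]
        have hf : (!(pvLineValue (PySem.Str.strip l) == "") &&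
            !(PySem.Str.lower (pvLineValue (PySem.Str.strip l)) == "none")) = false := by
          rcases not_and_or.mp hv with h | h <;> simp at h <;> simp [h]
        rw [if_pos hp, hg]
        simp only [List.filter_cons]
        rw [hf]
        simpa using ih
    · have hg : pvG pre l = none := by simp only [pvG]; rw [if_neg hp]
      rw [if_neg hp, hg]
      exact ih

theorem pvParseField_eq (contents pre : String) :
    pvParseField contents pre =
      pvLast ("No", "") ((PySem.Str.splitlines contents).filterMap (pvG pre)) := by
  simp only [pvParseField, pvLast, pvFilter_eq]

-- A's fold, with arbitrary incoming states, equals the two independent last-value scans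
theorem pvFoldA_eq (lines : List String) :
    ∀ (c a : String × String),
      lines.foldl pvStepA (c.1, c.2, a.1, a.2) =
        ((pvLast c (lines.filterMap (pvG "- special configurations:"))).1,
         (pvLast c (lines.filterMap (pvG "- special configurations:"))).2,
         (pvLast a (lines.filterMap (pvG "- installer arguments:"))).1,
         (pvLast a (lines.filterMap (pvG "- installer arguments:"))).2) := by
  induction lines with
  | nil => intro c a; simp [pvLast]
  | cons l rest ih =>
    intro c a
    simp only [List.foldl_cons, List.filterMap_cons]
    by_cases h1 : PySem.Str.startswith (PySem.Str.lower (PySem.Str.strip l))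
        "- special configurations:" = true
    · have h2 : ¬ PySem.Str.startswith (PySem.Str.lower (PySem.Str.strip l))
          "- installer arguments:" = true := by
        intro h; have hf := pvDisj _ h1; rw [h] at hf; cases hf
      have hg2 : pvG "- installer arguments:" l = none := by
        simp only [pvG]; rw [if_neg h2]
      by_cases hv : pvLineValue (PySem.Str.strip l) ≠ "" ∧
          PySem.Str.lower (pvLineValue (PySem.Str.strip l)) ≠ "none"
      · have hg1 : pvG "- special configurations:" l =
            some (pvLineValue (PySem.Str.strip l)) := by
          simp only [pvG]; rw [if_pos h1, if_pos hv]
        have hs : pvStepA (c.1, c.2, a.1, a.2) l =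
            ("Yes", pvLineValue (PySem.Str.strip l), a.1, a.2) := by
          simp only [pvStepA]; rw [if_pos h1, if_pos hv]
        rw [hs, hg1, hg2, pvLast_cons]
        exact ih ("Yes", pvLineValue (PySem.Str.strip l)) a
      · have hg1 : pvG "- special configurations:" l = none := by
          simp only [pvG]; rw [if_pos h1, if_neg hv]
        have hs : pvStepA (c.1, c.2, a.1, a.2) l = (c.1, c.2, a.1, a.2) := by
          simp only [pvStepA]; rw [if_pos h1, if_neg hv]
        rw [hs, hg1, hg2]
        exact ih c a
    · have hg1 : pvG "- special configurations:" l = none := by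
        simp only [pvG]; rw [if_neg h1]
      by_cases h2 : PySem.Str.startswith (PySem.Str.lower (PySem.Str.strip l))
          "- installer arguments:" = true
      · by_cases hv : pvLineValue (PySem.Str.strip l) ≠ "" ∧
            PySem.Str.lower (pvLineValue (PySem.Str.strip l)) ≠ "none"
        · have hg2 : pvG "- installer arguments:" l =
              some (pvLineValue (PySem.Str.strip l)) := by
            simp only [pvG]; rw [if_pos h2, if_pos hv]
          have hs : pvStepA (c.1, c.2, a.1, a.2) l =
              (c.1, c.2, "Yes", pvLineValue (PySem.Str.strip l)) := by
            simp only [pvStepA]; rw [if_neg h1, if_pos h2, if_pos hv]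
          rw [hs, hg1, hg2, pvLast_cons]
          exact ih c ("Yes", pvLineValue (PySem.Str.strip l))
        · have hg2 : pvG "- installer arguments:" l = none := by
            simp only [pvG]; rw [if_pos h2, if_neg hv]
          have hs : pvStepA (c.1, c.2, a.1, a.2) l = (c.1, c.2, a.1, a.2) := by
            simp only [pvStepA]; rw [if_neg h1, if_pos h2, if_neg hv]
          rw [hs, hg1, hg2]
          exact ih c a
      · have hg2 : pvG "- installer arguments:" l = none := by
          simp only [pvG]; rw [if_neg h2]
        have hs : pvStepA (c.1, c.2, a.1, a.2) l = (c.1, c.2, a.1, a.2) := by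
          simp only [pvStepA]; rw [if_neg h1, if_neg h2]
        rw [hs, hg1, hg2]
        exact ih c a

-- ===== VERDICT (by name: the statement is the Claim_ definition above) =====
theorem parse_binary_config_py_spec : Claim_equal_parse_binary_config_py := by
  intro contents _
  unfold Spec_parse_binary_config_py parse_binary_config_py parse_binary_config_py_alt
  rw [pvParseField_eq, pvParseField_eq]
  exact pvFoldA_eq (PySem.Str.splitlines contents) ("No", "") ("No", "")
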